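-- pv_equiv track=rewrite | github.com/eduard256/IoT2mqtt | shared/utils.py | validate_mqtt_topic
-- ===== SOURCE A (Python) =====
-- def validate_mqtt_topic(topic: str) -> bool:
--     """
--     Validate MQTT topic
--
--     Args:
--         topic: MQTT topic to validate
--
--     Returns:
--         True if valid, False otherwise
--     """
--     if not topic:
--         return False
--
--     # Check for invalid characters
--     invalid_chars = ['#', '+', '\0']
--     for char in invalid_chars:
--         if char in topic:
--             # # and + are valid as wildcards but not in normal topics
--             if char in ['#', '+']:
--                 # Check if used correctly as wildcards
--                 parts = topic.split('/')
--                 for part in parts: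
--                     if char in part and part != char:
--                         return False
--             else:
--                 return False
--
--     # Must not start or end with /
--     if topic.startswith('/') or topic.endswith('/'):
--         return False
--
--     # No double slashes
--     if '//' in topic:
--         return False
--
--     return True
-- ===== SOURCE B (Python) =====
-- def validate_mqtt_topic(topic: str) -> bool:
--     """Validate MQTT topic: one pass over the '/'-separated levels."""
--     if not topic:
--         return False
--     for level in topic.split('/'):
--         if not level:
--             return False
--         if '\0' in level:
--             return False
--         if '#' in level and level != '#':
--             return False
--         if '+' in level and level != '+':
--             return False
--     return True
-- ===== Notes on version B (the rewrite author's own statement) =====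
-- stated objective: simpler
-- what changed: B splits the topic once and validates each level in a single loop (empty level subsumes the leading-slash, trailing-slash and double-slash checks; wildcard and NUL checks move per level), replacing A's per-character substring scans plus three separate slash checks.
import Mathlib
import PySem

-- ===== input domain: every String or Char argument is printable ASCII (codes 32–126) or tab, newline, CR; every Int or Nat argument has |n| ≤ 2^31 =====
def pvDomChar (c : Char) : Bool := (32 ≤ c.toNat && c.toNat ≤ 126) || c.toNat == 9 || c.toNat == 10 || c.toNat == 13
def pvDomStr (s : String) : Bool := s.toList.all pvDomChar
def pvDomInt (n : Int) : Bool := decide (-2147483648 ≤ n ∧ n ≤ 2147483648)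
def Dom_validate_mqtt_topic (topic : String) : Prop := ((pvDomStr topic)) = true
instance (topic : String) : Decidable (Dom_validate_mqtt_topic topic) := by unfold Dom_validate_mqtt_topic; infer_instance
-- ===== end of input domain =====

-- B validates each '/'-separated level in one loop (an empty level subsumes A's three slash
-- checks); equivalence of the return values is proved for all strings.

-- ===== PORT A =====
-- A: empty check; loop over ['#','+','\0'] with substring tests and a per-part wildcard check;
-- then leading/trailing-slash and double-slash checks.  String ops on code points via PySem.Chars.
def validate_mqtt_topic (topic : String) : Bool :=
  let cs := topic.toList
  if cs.isEmpty then false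
  else if !(([['#'], ['+'], ['\x00']] : List (List Char)).all (fun ch =>
      if PySem.Chars.isIn ch cs then
        if ch == ['#'] || ch == ['+'] then
          -- parts = topic.split('/'); separator nonempty, so splitOn is exact
          (PySem.Chars.splitOn cs ['/']).all (fun part => !(PySem.Chars.isIn ch part && part != ch))
        else false
      else true)) then false
  else if PySem.Chars.startswith cs ['/'] || PySem.Chars.endswith cs ['/'] then false
  else if PySem.Chars.isIn ['/', '/'] cs then false
  else true

-- ===== PORT B =====
def validate_mqtt_topic_alt (topic : String) : Bool :=
  let cs := topic.toList
  if cs.isEmpty then false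
  else (PySem.Chars.splitOn cs ['/']).all (fun level =>
    !level.isEmpty &&
    !PySem.Chars.isIn ['\x00'] level &&
    !(PySem.Chars.isIn ['#'] level && level != ['#']) &&
    !(PySem.Chars.isIn ['+'] level && level != ['+']))

-- ===== PRECONDITION & SPEC =====
def Spec_validate_mqtt_topic (topic : String) (out : Bool) : Prop := out = validate_mqtt_topic_alt topic
instance (topic : String) (out : Bool) : Decidable (Spec_validate_mqtt_topic topic out) := by unfold Spec_validate_mqtt_topic; infer_instance

-- ===== CLAIM (what is proved, stated in full; the proofs are below) =====
def Claim_equal_validate_mqtt_topic : Prop := ∀ (topic : String), Dom_validate_mqtt_topic topic → Spec_validate_mqtt_topic topic (validate_mqtt_topic topic)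

-- ===== LEMMAS AND PROOFS =====

-- a simple structural model of topic.split('/')
def sp : List Char → List (List Char)
  | [] => [[]]
  | c :: rest =>
    if c = '/' then [] :: sp rest
    else
      match sp rest with
      | [] => [[c]]
      | p :: ps => (c :: p) :: ps

theorem sp_ne_nil (cs : List Char) : sp cs ≠ [] := by
  match cs with
  | [] => simp [sp]
  | c :: rest =>
    simp only [sp]
    split
    · simp
    · split <;> simp

theorem sp_dest (cs : List Char) : ∃ p ps, sp cs = p :: ps := by
  match h : sp cs with
  | [] => exact absurd h (sp_ne_nil cs)
  | p :: ps => exact ⟨p, ps, rfl⟩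

theorem sp_cons_slash (rest : List Char) : sp ('/' :: rest) = [] :: sp rest := by
  simp [sp]

theorem sp_cons (c : Char) (rest : List Char) (h : c ≠ '/') (p : List Char)
    (ps : List (List Char)) (hsp : sp rest = p :: ps) :
    sp (c :: rest) = (c :: p) :: ps := by
  simp [sp, h, hsp]

theorem go_eq (fuel : Nat) (l cur : List Char) (acc : List (List Char))
    (h : l.length ≤ fuel) :
    PySem.Chars.splitOn.go ['/'] fuel l cur acc =
      acc.reverse ++ (match sp l with
        | [] => []
        | p :: ps => (cur.reverse ++ p) :: ps) := by
  induction fuel generalizing l cur acc with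
  | zero =>
    match l with
    | [] => simp [PySem.Chars.splitOn.go, sp]
    | c :: rest => simp at h
  | succ f ih =>
    match l with
    | [] => simp [PySem.Chars.splitOn.go, sp]
    | c :: rest =>
      rw [PySem.Chars.splitOn.go]
      by_cases hc : c = '/'
      · subst hc
        simp only [List.isPrefixOf, Bool.and_true, beq_self_eq_true, if_true,
          List.length_cons, List.length_nil, Nat.zero_add, List.drop_succ_cons, List.drop_zero]
        rw [ih rest [] _ (by simpa using Nat.le_of_succ_le_succ h)]
        obtain ⟨p, ps, hsp⟩ := sp_dest rest
        rw [sp_cons_slash, hsp]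
        simp
      · have hpre : ['/'].isPrefixOf (c :: rest) = false := by
          simp only [List.isPrefixOf, Bool.and_true]
          exact decide_eq_false (fun h => hc h.symm)
        simp only [hpre, Bool.false_eq_true, if_false]
        rw [ih rest (c :: cur) acc (by simpa using Nat.le_of_succ_le_succ h)]
        obtain ⟨p, ps, hsp⟩ := sp_dest rest
        rw [sp_cons c rest hc p ps hsp, hsp]
        simp

theorem splitOn_slash (cs : List Char) : PySem.Chars.splitOn cs ['/'] = sp cs := by
  rw [PySem.Chars.splitOn, go_eq _ _ _ _ (Nat.le_succ _)]
  obtain ⟨p, ps, hsp⟩ := sp_dest cs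
  rw [hsp]
  simp

theorem isIn_singleton (c0 : Char) (cs : List Char) :
    PySem.Chars.isIn [c0] cs = true ↔ c0 ∈ cs := by
  rw [PySem.Chars.isIn_iff_infix]
  constructor
  · intro h; exact h.mem (by simp)
  · intro h
    obtain ⟨s, t, rfl⟩ := List.mem_iff_append.mp h
    exact ⟨s, t, by simp⟩

-- membership in the topic vs membership in some level
theorem mem_sp_iff (c0 : Char) (hc : c0 ≠ '/') :
    ∀ (cs : List Char), c0 ∈ cs ↔ ∃ p ∈ sp cs, c0 ∈ p
  | [] => by simp [sp]
  | c :: rest => by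
    have hrest := mem_sp_iff c0 hc rest
    by_cases h : c = '/'
    · subst h
      rw [sp_cons_slash]
      constructor
      · intro hm
        rcases List.mem_cons.mp hm with hce | hm
        · exact absurd hce hc
        · obtain ⟨p, hp, hmp⟩ := hrest.mp hm
          exact ⟨p, List.mem_cons_of_mem _ hp, hmp⟩
      · rintro ⟨p, hp, hmp⟩
        rcases List.mem_cons.mp hp with hpe | hp
        · rw [hpe] at hmp; simp at hmp
        · exact List.mem_cons_of_mem _ (hrest.mpr ⟨p, hp, hmp⟩)
    · obtain ⟨p, ps, hsp⟩ := sp_dest rest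
      rw [sp_cons c rest h p ps hsp]
      rw [hsp] at hrest
      constructor
      · intro hm
        rcases List.mem_cons.mp hm with hce | hm
        · exact ⟨c :: p, by simp, by simp [hce]⟩
        · obtain ⟨q, hq, hmq⟩ := hrest.mp hm
          rcases List.mem_cons.mp hq with hqe | hq
          · exact ⟨c :: p, by simp, by rw [hqe] at hmq; exact List.mem_cons_of_mem _ hmq⟩
          · exact ⟨q, List.mem_cons_of_mem _ hq, hmq⟩
      · rintro ⟨q, hq, hmq⟩
        rcases List.mem_cons.mp hq with hqe | hq
        · rw [hqe] at hmq
          rcases List.mem_cons.mp hmq with hce | hmq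
          · exact List.mem_cons.mpr (Or.inl hce)
          · exact List.mem_cons_of_mem _ (hrest.mpr ⟨p, by simp, hmq⟩)
        · exact List.mem_cons_of_mem _ (hrest.mpr ⟨q, List.mem_cons_of_mem _ hq, hmq⟩)

theorem prefix_slash_iff (r : List Char) : ['/'] <+: r ↔ r.head? = some '/' := by
  cases r with
  | nil => simp
  | cons a l =>
    rw [List.cons_prefix_cons]
    simp [eq_comm]

theorem forall_cons_ne (x : List Char) (xs : List (List Char)) (hx : x ≠ []) :
    (∀ q ∈ x :: xs, q ≠ []) ↔ (∀ q ∈ xs, q ≠ []) :=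
  ⟨fun h q hq => h q (List.mem_cons_of_mem _ hq),
   fun h q hq => by rcases List.mem_cons.mp hq with rfl | hq; exacts [hx, h q hq]⟩

-- no empty level  ↔  not leading '/', not trailing '/', no "//"   (the three slash checks)
theorem no_empty_sp : ∀ (cs : List Char),
    (∀ p ∈ sp cs, p ≠ []) ↔
      (cs ≠ [] ∧ cs.head? ≠ some '/' ∧ cs.getLast? ≠ some '/' ∧ ¬ ['/', '/'] <:+: cs)
  | [] => by simp [sp]
  | [c] => by
    by_cases h : c = '/'
    · subst h; rw [sp_cons_slash]; simp [sp]
    · have e : sp [c] = [[c]] := sp_cons c [] h [] [] rfl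
      have hni : ¬ ['/', '/'] <:+: [c] := fun hi => by
        have := hi.length_le; simp at this
      rw [e]
      simp [h, hni]
  | c :: d :: r => by
    by_cases h : c = '/'
    · subst h
      rw [sp_cons_slash]
      simp
    · by_cases hd : d = '/'
      · subst hd
        obtain ⟨p, ps, hspr⟩ := sp_dest r
        have e1 : sp ('/' :: r) = [] :: p :: ps := by rw [sp_cons_slash, hspr]
        have e2 : sp (c :: '/' :: r) = [c] :: p :: ps := sp_cons c _ h _ _ e1
        have ih := no_empty_sp r
        rw [hspr] at ih
        have hinf : (['/', '/'] <:+: c :: '/' :: r) ↔ (r.head? = some '/' ∨ ['/', '/'] <:+: r) := by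
          rw [List.infix_cons_iff, List.infix_cons_iff, ← prefix_slash_iff]
          constructor
          · rintro (hpre | hpre | hinf)
            · rw [List.cons_prefix_cons] at hpre; exact absurd hpre.1.symm h
            · rw [List.cons_prefix_cons] at hpre; exact Or.inl hpre.2
            · exact Or.inr hinf
          · rintro (hpre | hinf)
            · exact Or.inr (Or.inl (by rw [List.cons_prefix_cons]; exact ⟨rfl, hpre⟩))
            · exact Or.inr (Or.inr hinf)
        cases r with
        | nil =>
          rw [show sp ([] : List Char) = [[]] from rfl] at hspr
          injection hspr with h1 h2
          subst h1
          rw [e2]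
          simp
        | cons e t =>
          rw [e2, forall_cons_ne _ _ (by simp), ih]
          rw [show (c :: '/' :: e :: t).getLast? = (e :: t).getLast? by
            rw [List.getLast?_cons_cons, List.getLast?_cons_cons]]
          rw [iff_iff_implies_and_implies]
          constructor
          · rintro ⟨-, hh, hl, hdd⟩
            refine ⟨by simp, by simp [h], hl, ?_⟩
            rw [hinf]
            exact not_or.mpr ⟨hh, hdd⟩
          · rintro ⟨-, -, hl, hdd⟩
            rw [hinf] at hdd
            exact ⟨by simp, (not_or.mp hdd).1, hl, (not_or.mp hdd).2⟩
      · obtain ⟨p, ps, hspr⟩ := sp_dest r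
        have e1 : sp (d :: r) = (d :: p) :: ps := sp_cons d r hd p ps hspr
        have e2 : sp (c :: d :: r) = (c :: d :: p) :: ps := sp_cons c _ h _ _ e1
        have ih := no_empty_sp (d :: r)
        rw [e1] at ih
        have hinf : (['/', '/'] <:+: c :: d :: r) ↔ (['/', '/'] <:+: d :: r) := by
          rw [List.infix_cons_iff]
          constructor
          · rintro (hpre | hinf)
            · rw [List.cons_prefix_cons] at hpre; exact absurd hpre.1.symm h
            · exact hinf
          · exact Or.inr
        rw [e2, forall_cons_ne _ _ (by simp),
          ← forall_cons_ne (d :: p) ps (by simp), ih, List.getLast?_cons_cons, hinf]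
        rw [iff_iff_implies_and_implies]
        constructor
        · rintro ⟨-, -, hl, hdd⟩
          exact ⟨by simp, by simp [h], hl, hdd⟩
        · rintro ⟨-, -, hl, hdd⟩
          exact ⟨by simp, by simp [hd], hl, hdd⟩

theorem startswith_head (cs : List Char) :
    PySem.Chars.startswith cs ['/'] = true ↔ cs.head? = some '/' := by
  rw [PySem.Chars.startswith_iff, prefix_slash_iff]

theorem endswith_last (cs : List Char) :
    PySem.Chars.endswith cs ['/'] = true ↔ cs.getLast? = some '/' := by
  rw [PySem.Chars.endswith_iff]
  constructor
  · rintro ⟨s, rfl⟩; simp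
  · intro hl
    obtain ⟨l', rfl⟩ := List.getLast?_eq_some_iff.mp hl
    exact ⟨l', rfl⟩

-- per-level wildcard clause is vacuous when the char is absent from the topic
theorem wildcard_vacuous (c0 : Char) (hc : c0 ≠ '/') (cs : List Char)
    (habs : ¬ PySem.Chars.isIn [c0] cs = true) :
    ∀ p ∈ sp cs, (!(PySem.Chars.isIn [c0] p && p != [c0])) = true := by
  intro p hp
  have hmem : c0 ∉ cs := fun hm => habs ((isIn_singleton c0 cs).mpr hm)
  have hnp : c0 ∉ p := fun hm => hmem ((mem_sp_iff c0 hc cs).mpr ⟨p, hp, hm⟩)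
  have hfalse : PySem.Chars.isIn [c0] p = false := by
    cases hh : PySem.Chars.isIn [c0] p
    · rfl
    · exact absurd ((isIn_singleton c0 p).mp hh) hnp
  simp [hfalse]

theorem bool_ext (a b : Bool) (h : a = true ↔ b = true) : a = b := by
  cases a <;> cases b <;> simp_all

theorem chain_iff (big s d : Bool) :
    ((if !big then false else if s then false else if d then false else true) = true)
      ↔ (big = true ∧ s = false ∧ d = false) := by
  cases big <;> cases s <;> cases d <;> simp

theorem if_all_vacuous (c0 : Char) (hc : c0 ≠ '/') (cs : List Char) :
    (if PySem.Chars.isIn [c0] cs then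
       (sp cs).all (fun part => !(PySem.Chars.isIn [c0] part && part != [c0]))
     else true)
    = (sp cs).all (fun part => !(PySem.Chars.isIn [c0] part && part != [c0])) := by
  split_ifs with h
  · rfl
  · symm
    rw [List.all_eq_true]
    intro p hp
    exact wildcard_vacuous c0 hc cs h p hp

theorem main_eq (cs : List Char) :
    (if cs.isEmpty then false
     else if !(([['#'], ['+'], ['\x00']] : List (List Char)).all (fun ch =>
        if PySem.Chars.isIn ch cs then
          if ch == ['#'] || ch == ['+'] then
            (PySem.Chars.splitOn cs ['/']).all (fun part => !(PySem.Chars.isIn ch part && part != ch))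
          else false
        else true)) then false
     else if PySem.Chars.startswith cs ['/'] || PySem.Chars.endswith cs ['/'] then false
     else if PySem.Chars.isIn ['/', '/'] cs then false
     else true)
    = (if cs.isEmpty then false
       else (PySem.Chars.splitOn cs ['/']).all (fun level =>
         !level.isEmpty &&
         !PySem.Chars.isIn ['\x00'] level &&
         !(PySem.Chars.isIn ['#'] level && level != ['#']) &&
         !(PySem.Chars.isIn ['+'] level && level != ['+']))) := by
  by_cases h0 : cs.isEmpty
  · rw [if_pos h0, if_pos h0]
  · have hne : cs ≠ [] := fun h => h0 (by simp [h])
    rw [if_neg h0, if_neg h0, splitOn_slash]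
    have hnul_iff : (∀ p ∈ sp cs, PySem.Chars.isIn ['\x00'] p = false)
        ↔ PySem.Chars.isIn ['\x00'] cs = false := by
      constructor
      · intro h
        cases hh : PySem.Chars.isIn ['\x00'] cs
        · rfl
        · exfalso
          obtain ⟨p, hp, hm⟩ := (mem_sp_iff '\x00' (by decide) cs).mp ((isIn_singleton _ _).mp hh)
          have := h p hp
          rw [(isIn_singleton '\x00' p).mpr hm] at this
          cases this
      · intro h p hp
        cases hh : PySem.Chars.isIn ['\x00'] p
        · rfl
        · exfalso
          have := (mem_sp_iff '\x00' (by decide) cs).mpr ⟨p, hp, (isIn_singleton _ _).mp hh⟩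
          rw [(isIn_singleton '\x00' cs).mpr this] at h
          cases h
    have hBiff : ((sp cs).all (fun level =>
         !level.isEmpty &&
         !PySem.Chars.isIn ['\x00'] level &&
         !(PySem.Chars.isIn ['#'] level && level != ['#']) &&
         !(PySem.Chars.isIn ['+'] level && level != ['+'])) = true)
        ↔ ((∀ p ∈ sp cs, p ≠ []) ∧ PySem.Chars.isIn ['\x00'] cs = false ∧
           (sp cs).all (fun part => !(PySem.Chars.isIn ['#'] part && part != ['#'])) = true ∧
           (sp cs).all (fun part => !(PySem.Chars.isIn ['+'] part && part != ['+'])) = true) := by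
      simp only [List.all_eq_true, Bool.and_eq_true, Bool.not_eq_true']
      constructor
      · intro h
        refine ⟨fun p hp => ?_, hnul_iff.mp (fun p hp => (h p hp).1.1.2),
          fun p hp => (h p hp).1.2, fun p hp => (h p hp).2⟩
        have := (h p hp).1.1.1
        intro hpe
        rw [hpe] at this
        simp at this
      · rintro ⟨h1, h2, h3, h4⟩ p hp
        refine ⟨⟨⟨?_, hnul_iff.mpr h2 p hp⟩, h3 p hp⟩, h4 p hp⟩
        cases hpe : p.isEmpty
        · rfl
        · exact absurd (List.isEmpty_iff.mp hpe) (h1 p hp)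
    have hslash : ((PySem.Chars.startswith cs ['/'] || PySem.Chars.endswith cs ['/']) = false ∧
        PySem.Chars.isIn ['/', '/'] cs = false) ↔ (∀ p ∈ sp cs, p ≠ []) := by
      rw [no_empty_sp, Bool.or_eq_false_iff]
      constructor
      · rintro ⟨⟨hs, he⟩, hd⟩
        refine ⟨hne, ?_, ?_, ?_⟩
        · intro hh
          have := (startswith_head cs).mpr hh
          rw [hs] at this
          cases this
        · intro hh
          have := (endswith_last cs).mpr hh
          rw [he] at this
          cases this
        · intro hh
          have := (PySem.Chars.isIn_iff_infix _ _).mpr hh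
          rw [hd] at this
          cases this
      · rintro ⟨-, h1, h2, h3⟩
        refine ⟨⟨?_, ?_⟩, ?_⟩
        · cases hh : PySem.Chars.startswith cs ['/']
          · rfl
          · exact absurd ((startswith_head cs).mp hh) h1
        · cases hh : PySem.Chars.endswith cs ['/']
          · rfl
          · exact absurd ((endswith_last cs).mp hh) h2
        · cases hh : PySem.Chars.isIn ['/', '/'] cs
          · rfl
          · exact absurd ((PySem.Chars.isIn_iff_infix _ _).mp hh) h3
    have h3iff : ((if PySem.Chars.isIn ['\x00'] cs then false else true) = true)
        ↔ (PySem.Chars.isIn ['\x00'] cs = false) := by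
      cases hh : PySem.Chars.isIn ['\x00'] cs
      · simp
      · simp_all
    apply bool_ext
    rw [chain_iff]
    have hbigiff : ((([['#'], ['+'], ['\x00']] : List (List Char)).all (fun ch =>
        if PySem.Chars.isIn ch cs then
          if ch == ['#'] || ch == ['+'] then
            (sp cs).all (fun part => !(PySem.Chars.isIn ch part && part != ch))
          else false
        else true)) = true)
        ↔ ((if PySem.Chars.isIn ['#'] cs then
              (sp cs).all (fun part => !(PySem.Chars.isIn ['#'] part && part != ['#'])) else true) = true ∧
           (if PySem.Chars.isIn ['+'] cs then
              (sp cs).all (fun part => !(PySem.Chars.isIn ['+'] part && part != ['+'])) else true) = true ∧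
           (if PySem.Chars.isIn ['\x00'] cs then false else true) = true) := by
      simp only [List.all_cons, List.all_nil, Bool.and_eq_true, Bool.and_true,
        show ((['#'] : List Char) == ['#'] || (['#'] : List Char) == ['+']) = true from rfl,
        show ((['+'] : List Char) == ['#'] || (['+'] : List Char) == ['+']) = true from rfl,
        show ((['\x00'] : List Char) == ['#'] || (['\x00'] : List Char) == ['+']) = false from rfl,
        if_true, Bool.false_eq_true, if_false]
    rw [hbigiff, if_all_vacuous '#' (by decide) cs, if_all_vacuous '+' (by decide) cs, h3iff,
      hBiff, ← hslash]
    tauto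

-- ===== VERDICT (by name: the statement is the Claim_ definition above) =====
theorem validate_mqtt_topic_spec : Claim_equal_validate_mqtt_topic := by
  intro topic _
  unfold Spec_validate_mqtt_topic validate_mqtt_topic validate_mqtt_topic_alt
  exact main_eq topic.toList
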